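-- pv_equiv track=rewrite | github.com/JnanaPhani/automode_webpage | helper_app/legacy/imu/sensor_config.py | _decode_ascii_words
-- ===== SOURCE A (Python) =====
-- from typing import List, Optional
--
-- def _decode_ascii_words(words: List[int], little_endian: bool = True) -> str:
--     chars: List[str] = []
--     for word in words:
--         low = word & 0xFF
--         high = (word >> 8) & 0xFF
--         byte_order = (low, high) if little_endian else (high, low)
--         for byte in byte_order:
--             if byte != 0x00:
--                 chars.append(chr(byte))
--     return "".join(chars).strip()
-- ===== SOURCE B (Python) =====
-- from typing import List
--
-- def _decode_ascii_words(words: List[int], little_endian: bool = True) -> str: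
--     def part(i: int, j: int) -> str:
--         # decode words[i:j] by divide and conquer
--         if j - i <= 0:
--             return ""
--         if j - i == 1:
--             w = words[i]
--             low, high = w & 0xFF, (w >> 8) & 0xFF
--             pair = (low, high) if little_endian else (high, low)
--             return "".join(chr(b) for b in pair if b)
--         m = (i + j) // 2
--         return part(i, m) + part(m, j)
--     return part(0, len(words)).strip()
-- ===== Notes on version B (the rewrite author's own statement) =====
-- stated objective: alternative
-- what changed: B decodes by divide-and-conquer recursion on index ranges (splitting at the midpoint, decoding one word per leaf to a small string and concatenating the halves) instead of A's single linear left-to-right loop over the words with a char-list accumulator.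
import Mathlib
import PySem

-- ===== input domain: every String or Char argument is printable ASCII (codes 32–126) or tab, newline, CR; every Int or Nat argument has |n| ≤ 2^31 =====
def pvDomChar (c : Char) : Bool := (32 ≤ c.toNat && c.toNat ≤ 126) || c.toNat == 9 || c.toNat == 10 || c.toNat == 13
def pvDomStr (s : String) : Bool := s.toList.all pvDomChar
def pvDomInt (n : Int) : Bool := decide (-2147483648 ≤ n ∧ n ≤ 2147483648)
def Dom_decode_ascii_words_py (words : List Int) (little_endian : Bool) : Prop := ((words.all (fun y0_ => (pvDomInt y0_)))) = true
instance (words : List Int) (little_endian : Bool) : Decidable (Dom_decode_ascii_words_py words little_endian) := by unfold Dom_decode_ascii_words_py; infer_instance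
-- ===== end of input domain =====

-- B decodes by divide and conquer over index ranges (tree recursion, per-word chunk strings
-- concatenated) instead of A's linear left fold with an accumulator. Objective: alternative.

-- ===== PORT A =====
-- literal port of A: for each word append chr(low)/chr(high) (order per little_endian),
-- skipping 0x00 bytes; then "".join(chars).strip()  (join of single chars = String.ofList)
def decode_ascii_words_py (words : List Int) (little_endian : Bool) : String :=
  let chars : List Char := words.foldl (fun acc word =>
    let low := PySem.Int.band word 255
    let high := PySem.Int.band (word >>> (8 : Nat)) 255
    let byte_order := if little_endian then (low, high) else (high, low)
    [byte_order.1, byte_order.2].foldl (fun a byte =>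
      if byte ≠ 0 then a ++ [Char.ofNat byte.toNat] else a) acc) []
  PySem.Str.strip (String.ofList chars)

-- ===== PORT B =====
-- literal port of Source B: the single-word case 'join(chr(b) for b in pair if b)'
def pvChunkB (little_endian : Bool) (w : Int) : List Char :=
  let low := PySem.Int.band w 255
  let high := PySem.Int.band (w >>> (8 : Nat)) 255
  let pair := if little_endian then (low, high) else (high, low)
  ([pair.1, pair.2].filter (fun b => b != 0)).map (fun b => Char.ofNat b.toNat)

-- literal port of Source B's recursive 'part(i, j)' (divide and conquer on the index range)
def pvPartB (words : List Int) (little_endian : Bool) (i j : Nat) : String :=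
  if j ≤ i then ""
  else if j - i = 1 then
    String.ofList (pvChunkB little_endian (PySem.List.pyGetD words (Int.ofNat i) 0))
  else
    pvPartB words little_endian i ((i + j) / 2) ++ pvPartB words little_endian ((i + j) / 2) j
termination_by j - i
decreasing_by all_goals omega

def decode_ascii_words_py_alt (words : List Int) (little_endian : Bool) : String :=
  PySem.Str.strip (pvPartB words little_endian 0 words.length)

-- ===== PRECONDITION & SPEC =====
def Spec_decode_ascii_words_py (words : List Int) (little_endian : Bool) (out : String) : Prop := out = decode_ascii_words_py_alt words little_endian
instance (words : List Int) (little_endian : Bool) (out : String) : Decidable (Spec_decode_ascii_words_py words little_endian out) := by unfold Spec_decode_ascii_words_py; infer_instance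

-- ===== CLAIM (what is proved, stated in full; the proofs are below) =====
def Claim_equal_decode_ascii_words_py : Prop := ∀ (words : List Int) (little_endian : Bool), Dom_decode_ascii_words_py words little_endian → Spec_decode_ascii_words_py words little_endian (decode_ascii_words_py words little_endian)

-- ===== LEMMAS AND PROOFS =====

-- A's inner two-byte loop equals B's single-word chunk (filter moved before the map)
theorem stepA_eq (acc : List Char) (b1 b2 : Int) :
    ([b1, b2].foldl (fun a byte => if byte ≠ 0 then a ++ [Char.ofNat byte.toNat] else a) acc)
      = acc ++ (([b1, b2].filter (fun b => b != 0)).map (fun b => Char.ofNat b.toNat)) := by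
  by_cases hb1 : b1 = 0 <;> by_cases hb2 : b2 = 0 <;>
    simp [List.foldl, hb1, hb2]

-- A's per-word body (lets and pair as in the port) appends exactly pvChunkB
theorem stepA_full (le : Bool) (acc : List Char) (w : Int) :
    (let low := PySem.Int.band w 255
     let high := PySem.Int.band (w >>> (8 : Nat)) 255
     let byte_order := if le then (low, high) else (high, low)
     [byte_order.1, byte_order.2].foldl (fun a byte =>
       if byte ≠ 0 then a ++ [Char.ofNat byte.toNat] else a) acc)
    = acc ++ pvChunkB le w := by
  cases le
  · show ([PySem.Int.band (w >>> (8 : Nat)) 255, PySem.Int.band w 255].foldl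
      (fun a byte => if byte ≠ 0 then a ++ [Char.ofNat byte.toNat] else a) acc) = _
    rw [stepA_eq]
    simp [pvChunkB]
  · show ([PySem.Int.band w 255, PySem.Int.band (w >>> (8 : Nat)) 255].foldl
      (fun a byte => if byte ≠ 0 then a ++ [Char.ofNat byte.toNat] else a) acc) = _
    rw [stepA_eq]
    simp [pvChunkB]

-- the whole A fold, generalized over the accumulator
theorem foldA_eq (le : Bool) :
    ∀ (words : List Int) (acc : List Char),
      words.foldl (fun acc word =>
        let low := PySem.Int.band word 255
        let high := PySem.Int.band (word >>> (8 : Nat)) 255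
        let byte_order := if le then (low, high) else (high, low)
        [byte_order.1, byte_order.2].foldl (fun a byte =>
          if byte ≠ 0 then a ++ [Char.ofNat byte.toNat] else a) acc) acc
      = acc ++ (words.flatMap (pvChunkB le)) := by
  intro words
  induction words with
  | nil => intro acc; simp
  | cons w ws ih =>
    intro acc
    rw [List.foldl_cons, ih, stepA_full le acc w, List.flatMap_cons, List.append_assoc]

-- B's divide-and-conquer over [i, j) decodes exactly the slice words[i:j]
theorem pvPartB_eq (words : List Int) (le : Bool) :
    ∀ (n i j : Nat), j - i ≤ n → j ≤ words.length →
      pvPartB words le i j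
        = String.ofList (((words.drop i).take (j - i)).flatMap (pvChunkB le)) := by
  intro n
  induction n with
  | zero =>
    intro i j hn hj
    rw [pvPartB]
    have hji : j ≤ i := by omega
    simp [hji, Nat.sub_eq_zero_of_le hji]
  | succ n ih =>
    intro i j hn hj
    rw [pvPartB]
    by_cases hji : j ≤ i
    · simp [hji, Nat.sub_eq_zero_of_le hji]
    · by_cases h1 : j - i = 1
      · have hi : i < words.length := by omega
        have hdrop : words.drop i = words[i] :: words.drop (i + 1) :=
          List.drop_eq_getElem_cons hi
        have hget : PySem.List.pyGetD words (Int.ofNat i) 0 = words[i] := by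
          rw [show (Int.ofNat i) = ((i : Nat) : Int) from rfl, PySem.List.pyGetD_natCast,
            List.getD_eq_getElem _ _ hi]
        rw [if_neg hji, if_pos h1, hget, h1, hdrop, List.take_succ_cons, List.take_zero]
        simp
      · have h2 : 2 ≤ j - i := by omega
        have hm1 : i < (i + j) / 2 := by omega
        have hm2 : (i + j) / 2 < j := by omega
        simp only [hji, if_false, h1, if_false]
        rw [ih i ((i + j) / 2) (by omega) (by omega),
            ih ((i + j) / 2) j (by omega) hj]
        rw [← String.ofList_append, ← List.flatMap_append]
        congr 2
        have hsplit : j - i = ((i + j) / 2 - i) + (j - (i + j) / 2) := by omega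
        rw [hsplit, List.take_add, List.drop_drop,
          show i + ((i + j) / 2 - i) = (i + j) / 2 by omega]

-- ===== VERDICT (by name: the statement is the Claim_ definition above) =====
theorem decode_ascii_words_py_spec : Claim_equal_decode_ascii_words_py := by
  intro words le _
  show decode_ascii_words_py words le = decode_ascii_words_py_alt words le
  unfold decode_ascii_words_py decode_ascii_words_py_alt
  rw [foldA_eq le words [], pvPartB_eq words le words.length 0 words.length
    (by omega) (le_refl _)]
  simp
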